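-- pv_equiv track=rewrite | github.com/EagleStelle/never-stelle | app/app.py | normalize_template_syntax
-- ===== SOURCE A (Python) =====
-- EXTERNAL_PLACEHOLDERS = {
--     "%#TITLE#%": "{{title}}",
--     "%#ID#%": "{{video_id}}",
--     "%#AUTHOR#%": "{{author}}",
--     "%#ALIAS#%": "{{author_nickname}}",
--     "%#QUALITY#%": "{{quality}}",
-- }
--
-- def normalize_template_syntax(template: str) -> str:
--     template = template or ""
--     for external, go_style in EXTERNAL_PLACEHOLDERS.items():
--         template = template.replace(external, go_style)
--     template = template.replace("%#NowTime:YYYY-MM-DD#%", '{{now "2006-01-02"}}')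
--     template = template.replace("%#UploadTime:YYYY-MM-DD#%", '{{publish_time "2006-01-02"}}')
--     template = template.replace("%#UploadTime:YYYY-MM-DD+HH.mm.ss#%", '{{publish_time "2006-01-02+15.04.05"}}')
--     return template
-- ===== SOURCE B (Python) =====
-- # Single left-to-right scan over the template with one merged placeholder table,
-- # instead of eight full-string replace passes.
-- _MAPPING = {
--     "%#TITLE#%": "{{title}}",
--     "%#ID#%": "{{video_id}}",
--     "%#AUTHOR#%": "{{author}}",
--     "%#ALIAS#%": "{{author_nickname}}",
--     "%#QUALITY#%": "{{quality}}",
--     "%#NowTime:YYYY-MM-DD#%": '{{now "2006-01-02"}}',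
--     "%#UploadTime:YYYY-MM-DD#%": '{{publish_time "2006-01-02"}}',
--     "%#UploadTime:YYYY-MM-DD+HH.mm.ss#%": '{{publish_time "2006-01-02+15.04.05"}}',
-- }
--
-- def normalize_template_syntax(template: str) -> str:
--     template = template or ""
--     out = []
--     i = 0
--     n = len(template)
--     while i < n:
--         for key, val in _MAPPING.items():
--             if template.startswith(key, i):
--                 out.append(val)
--                 i += len(key)
--                 break
--         else:
--             out.append(template[i])
--             i += 1
--     return "".join(out)
-- ===== Notes on version B (the rewrite author's own statement) =====
-- stated objective: alternative
-- what changed: B merges the five external placeholders and the three time placeholders into one table and rewrites the template in a single left-to-right scan that matches a placeholder at each position, instead of A's eight sequential full-string replace passes; Pre_ excludes templates containing the substring "#%#", where an occurrence of one placeholder can overlap the start of another and A's result depends on accidental dict iteration order.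
-- outside the precondition, e.g. on normalize_template_syntax('%#ID#%#TITLE#%'): A returns '%#ID#{{title}}', B returns '{{video_id}}#TITLE#%'; on normalize_template_syntax('#%#'): A returns '#%#', B returns '#%#'
import Mathlib
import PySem

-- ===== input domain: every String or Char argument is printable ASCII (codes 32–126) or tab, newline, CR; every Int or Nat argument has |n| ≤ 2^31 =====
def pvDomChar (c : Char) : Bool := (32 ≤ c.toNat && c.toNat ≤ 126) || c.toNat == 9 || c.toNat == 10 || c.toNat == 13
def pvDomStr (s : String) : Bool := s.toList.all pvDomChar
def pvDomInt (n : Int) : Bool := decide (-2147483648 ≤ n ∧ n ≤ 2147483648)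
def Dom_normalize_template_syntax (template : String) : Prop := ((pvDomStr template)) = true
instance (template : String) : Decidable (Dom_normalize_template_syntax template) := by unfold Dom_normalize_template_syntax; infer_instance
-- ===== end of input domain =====

-- B rewrites the template in ONE left-to-right scan over a single merged placeholder table,
-- instead of A's eight sequential full-string replace passes (alternative decomposition; return value only, no mutation).

-- ===== PORT A =====
def pvExtPairs : List (String × String) :=
  [("%#TITLE#%", "{{title}}"),
   ("%#ID#%", "{{video_id}}"),
   ("%#AUTHOR#%", "{{author}}"),
   ("%#ALIAS#%", "{{author_nickname}}"),
   ("%#QUALITY#%", "{{quality}}")]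

def normalize_template_syntax (template : String) : String :=
  -- 'template = template or ""' (on str arguments the identity unless empty)
  let t0 := if template == "" then "" else template
  -- 'for external, go_style in EXTERNAL_PLACEHOLDERS.items(): template = template.replace(...)'
  let t1 := pvExtPairs.foldl (fun t p => PySem.Str.replace t p.1 p.2) t0
  let t2 := PySem.Str.replace t1 "%#NowTime:YYYY-MM-DD#%" "{{now \"2006-01-02\"}}"
  let t3 := PySem.Str.replace t2 "%#UploadTime:YYYY-MM-DD#%" "{{publish_time \"2006-01-02\"}}"
  PySem.Str.replace t3 "%#UploadTime:YYYY-MM-DD+HH.mm.ss#%" "{{publish_time \"2006-01-02+15.04.05\"}}"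

-- ===== PORT B =====
def pvMapping : List (String × String) :=
  [("%#TITLE#%", "{{title}}"),
   ("%#ID#%", "{{video_id}}"),
   ("%#AUTHOR#%", "{{author}}"),
   ("%#ALIAS#%", "{{author_nickname}}"),
   ("%#QUALITY#%", "{{quality}}"),
   ("%#NowTime:YYYY-MM-DD#%", "{{now \"2006-01-02\"}}"),
   ("%#UploadTime:YYYY-MM-DD#%", "{{publish_time \"2006-01-02\"}}"),
   ("%#UploadTime:YYYY-MM-DD+HH.mm.ss#%", "{{publish_time \"2006-01-02+15.04.05\"}}")]

def pvMappingC : List (List Char × List Char) := pvMapping.map (fun p => (p.1.toList, p.2.toList))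

-- the inner 'for key, val in _MAPPING.items(): if template.startswith(key, i): ...' probe
def pvMatchKey : List (List Char × List Char) → List Char → Option (List Char × Nat)
  | [], _ => none
  | (k, v) :: rest, s => if k.isPrefixOf s then some (v, k.length) else pvMatchKey rest s

-- the 'while i < n' loop over the remaining suffix; the fuel counts loop iterations (i strictly grows)
def pvScanGo : Nat → List Char → List Char
  | 0, _ => []
  | _ + 1, [] => []
  | fuel + 1, c :: t =>
    match pvMatchKey pvMappingC (c :: t) with
    | some (v, klen) => v ++ pvScanGo fuel ((c :: t).drop klen)
    | none => c :: pvScanGo fuel t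

def normalize_template_syntax_alt (template : String) : String :=
  let t := if template == "" then "" else template
  String.ofList (pvScanGo t.toList.length t.toList)

-- ===== PRECONDITION & SPEC =====
-- Pre_ excludes templates containing the substring "#%#": only there can an occurrence of one
-- placeholder overlap the start of another, and A's result then depends on the accidental
-- iteration order of EXTERNAL_PLACEHOLDERS.
def Pre_normalize_template_syntax (template : String) : Prop :=
  PySem.Str.isIn "#%#" template = false
instance (template : String) : Decidable (Pre_normalize_template_syntax template) := by
  unfold Pre_normalize_template_syntax; infer_instance

def pvWitness_normalize_template_syntax : String := "%#TITLE#%"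

def Spec_normalize_template_syntax (template : String) (out : String) : Prop :=
  out = normalize_template_syntax_alt template
instance (template : String) (out : String) : Decidable (Spec_normalize_template_syntax template out) := by
  unfold Spec_normalize_template_syntax; infer_instance

-- ===== CLAIM (what is proved, stated in full; the proofs are below) =====
def Claim_equal_normalize_template_syntax : Prop :=
  ∀ (template : String), Dom_normalize_template_syntax template →
    Pre_normalize_template_syntax template →
    Spec_normalize_template_syntax template (normalize_template_syntax template)

-- ===== LEMMAS AND PROOFS =====

-- key/value shape facts used throughout
def pvKeyGood (k : List Char) : Prop :=
  k ≠ [] ∧ '{' ∉ k ∧ k.take 2 = ['%', '#'] ∧ (['#', '%'].isSuffixOf k = true) ∧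
  (∀ u2 ∈ k.tails, u2.take 2 = ['%', '#'] → 2 ≤ u2.length → u2 = k)

def pvGood (p : List Char × List Char) : Prop :=
  pvKeyGood p.1 ∧ '%' ∉ p.2 ∧ p.2.head? = some '{'

lemma pvAllGood : ∀ p ∈ pvMappingC, pvGood p := by unfold pvGood pvKeyGood; decide

lemma pvPrefixFree : ∀ p ∈ pvMappingC, ∀ q ∈ pvMappingC, p.1 <+: q.1 → p = q := by decide

-- A's character-level chain of replace passes
def pvChain (ps : List (List Char × List Char)) (s : List Char) : List Char :=
  ps.foldl (fun t p => PySem.Chars.replace t p.1 p.2) s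

-- ---- unfolding lemmas for PySem.Chars.replace (nonempty pattern) ----
lemma pvGo_eq (old new : List Char) (hold : old ≠ []) :
    ∀ (fuel : Nat) (l acc : List Char), l.length ≤ fuel →
      PySem.Chars.replace.go old new fuel l acc = acc.reverse ++ PySem.Chars.replace l old new := by
  have hie : old.isEmpty = false := by simp [hold]
  have hlp : 0 < old.length := List.length_pos_iff.mpr hold
  intro fuel
  induction fuel using Nat.strong_induction_on with
  | _ fuel ih =>
    intro l acc hlen
    match fuel, l with
    | 0, l =>
      have hl : l = [] := List.eq_nil_of_length_eq_zero (Nat.le_zero.mp hlen)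
      subst hl
      simp [PySem.Chars.replace.go, PySem.Chars.replace, hie]
    | fuel + 1, [] =>
      simp [PySem.Chars.replace.go, PySem.Chars.replace, hie]
    | fuel + 1, c :: t =>
      have hlen' : t.length ≤ fuel := by simpa using hlen
      have hrhs : PySem.Chars.replace (c :: t) old new
          = PySem.Chars.replace.go old new (t.length + 1) (c :: t) [] := by
        simp [PySem.Chars.replace, hie]
      by_cases hp : old.isPrefixOf (c :: t)
      · have hdl : ((c :: t).drop old.length).length ≤ t.length := by
          simp only [List.length_drop, List.length_cons]; omega
        rw [hrhs]
        simp only [PySem.Chars.replace.go, hp, if_pos]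
        rw [ih fuel (Nat.lt_succ_self _) _ _ (le_trans hdl hlen'),
            ih t.length (Nat.lt_succ_of_le hlen') _ _ hdl]
        simp
      · rw [hrhs]
        simp only [PySem.Chars.replace.go, hp, if_neg, Bool.false_eq_true, not_false_iff]
        rw [ih fuel (Nat.lt_succ_self _) t _ hlen',
            ih t.length (Nat.lt_succ_of_le hlen') t _ le_rfl]
        simp

lemma pvReplace_nil (old new : List Char) (hold : old ≠ []) :
    PySem.Chars.replace [] old new = [] := by
  have hie : old.isEmpty = false := by simp [hold]
  simp [PySem.Chars.replace, hie, PySem.Chars.replace.go]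

lemma pvReplace_pos (old new s : List Char) (hold : old ≠ []) (h : old <+: s) :
    PySem.Chars.replace s old new = new ++ PySem.Chars.replace (s.drop old.length) old new := by
  have hie : old.isEmpty = false := by simp [hold]
  have hlp : 0 < old.length := List.length_pos_iff.mpr hold
  cases s with
  | nil => exact absurd (List.prefix_nil.mp h) hold
  | cons c t =>
    have hp : old.isPrefixOf (c :: t) = true := by simpa using h
    have hdl : ((c :: t).drop old.length).length ≤ t.length := by
      simp only [List.length_drop, List.length_cons]; omega
    have : PySem.Chars.replace (c :: t) old new
        = PySem.Chars.replace.go old new (t.length + 1) (c :: t) [] := by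
      simp [PySem.Chars.replace, hie]
    rw [this]
    simp only [PySem.Chars.replace.go, hp, if_pos]
    rw [pvGo_eq old new hold t.length _ _ hdl]
    simp

lemma pvReplace_neg (old new : List Char) (c : Char) (t : List Char) (h : ¬ old <+: (c :: t)) :
    PySem.Chars.replace (c :: t) old new = c :: PySem.Chars.replace t old new := by
  have hold : old ≠ [] := by rintro rfl; exact h (List.nil_prefix)
  have hie : old.isEmpty = false := by simp [hold]
  have hp : old.isPrefixOf (c :: t) = false := by
    rw [Bool.eq_false_iff]; intro hc; exact h (by simpa using hc)
  have : PySem.Chars.replace (c :: t) old new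
      = PySem.Chars.replace.go old new (t.length + 1) (c :: t) [] := by
    simp [PySem.Chars.replace, hie]
  rw [this]
  simp only [PySem.Chars.replace.go, hp, Bool.false_eq_true, if_neg, not_false_iff]
  rw [pvGo_eq old new hold t.length t _ le_rfl]
  simp

-- a '{'-free prefix of the output of a replace pass was already a prefix of its input
lemma pvPrefix_pullback (old new : List Char) (hold : old ≠ []) (w : List Char)
    (hnew : new = '{' :: w) :
    ∀ (s a : List Char), '{' ∉ a → a <+: PySem.Chars.replace s old new → a <+: s := by
  intro s
  induction s with
  | nil =>
    intro a ha hpre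
    rw [pvReplace_nil old new hold] at hpre
    simpa using hpre
  | cons c t ih =>
    intro a ha hpre
    by_cases hp : old <+: (c :: t)
    · rw [pvReplace_pos old new _ hold hp, hnew] at hpre
      cases a with
      | nil => exact List.nil_prefix
      | cons a0 a' =>
        rw [List.cons_append] at hpre
        obtain ⟨h0, -⟩ := List.cons_prefix_cons.mp hpre
        exact absurd (h0 ▸ List.mem_cons_self) ha
    · rw [pvReplace_neg old new c t hp] at hpre
      cases a with
      | nil => exact List.nil_prefix
      | cons a0 a' =>
        obtain ⟨h0, h1⟩ := List.cons_prefix_cons.mp hpre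
        have := ih a' (fun hc => ha (List.mem_cons_of_mem _ hc)) h1
        exact List.cons_prefix_cons.mpr ⟨h0, this⟩

-- a replace pass skips a block that no occurrence of the pattern touches
lemma pvReplace_append_front (old new u z : List Char)
    (H : ∀ u2, u2 <:+ u → u2 ≠ [] → ¬ old <+: (u2 ++ z)) :
    PySem.Chars.replace (u ++ z) old new = u ++ PySem.Chars.replace z old new := by
  induction u with
  | nil => simp
  | cons c u' ih =>
    have h1 : ¬ old <+: ((c :: u') ++ z) := H (c :: u') List.suffix_rfl (by simp)
    rw [List.cons_append, pvReplace_neg old new c (u' ++ z) (by simpa using h1)]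
    rw [ih (fun u2 hs hne => H u2 (hs.trans (List.suffix_cons c u')) hne)]
    rfl

lemma pvChain_append (xs ys : List (List Char × List Char)) (s : List Char) :
    pvChain (xs ++ ys) s = pvChain ys (pvChain xs s) := by
  simp [pvChain, List.foldl_append]

lemma pvChain_nil (ps : List (List Char × List Char)) (hg : ∀ p ∈ ps, pvGood p) :
    pvChain ps [] = [] := by
  induction ps with
  | nil => rfl
  | cons p ps' ih =>
    obtain ⟨⟨hne, -⟩, -⟩ := hg p List.mem_cons_self
    show pvChain ps' (PySem.Chars.replace [] p.1 p.2) = []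
    rw [pvReplace_nil p.1 p.2 hne]
    exact ih (fun q hq => hg q (List.mem_cons_of_mem _ hq))

lemma pvChain_cons (ps : List (List Char × List Char)) (hg : ∀ p ∈ ps, pvGood p) :
    ∀ (c : Char) (t : List Char), (∀ p ∈ ps, ¬ p.1 <+: (c :: t)) →
      pvChain ps (c :: t) = c :: pvChain ps t := by
  induction ps with
  | nil => intro c t _; rfl
  | cons p ps' ih =>
    intro c t h
    obtain ⟨⟨hne, -⟩, -, hv⟩ := hg p List.mem_cons_self
    obtain ⟨w, hw⟩ : ∃ w, p.2 = '{' :: w := by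
      cases hp2 : p.2 with
      | nil => rw [hp2] at hv; simp at hv
      | cons b w => rw [hp2] at hv; simp at hv; exact ⟨w, by rw [hv]⟩
    have hg' : ∀ q ∈ ps', pvGood q := fun q hq => hg q (List.mem_cons_of_mem _ hq)
    have hstep : PySem.Chars.replace (c :: t) p.1 p.2 = c :: PySem.Chars.replace t p.1 p.2 :=
      pvReplace_neg p.1 p.2 c t (h p List.mem_cons_self)
    show pvChain ps' (PySem.Chars.replace (c :: t) p.1 p.2) = c :: pvChain ps' (PySem.Chars.replace t p.1 p.2)
    rw [hstep]
    exact ih hg' c (PySem.Chars.replace t p.1 p.2) (fun q hq hpre => by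
      have : q.1 <+: (c :: t) := by
        obtain ⟨⟨-, hq2, -⟩, -⟩ := hg q (List.mem_cons_of_mem _ hq)
        exact pvPrefix_pullback p.1 p.2 hne w hw (c :: t) q.1 hq2 (by rw [hstep]; exact hpre)
      exact h q (List.mem_cons_of_mem _ hq) this)

lemma pvChain_front_val (v : List Char) (hv : '%' ∉ v) :
    ∀ (ps : List (List Char × List Char)), (∀ p ∈ ps, pvGood p) →
      ∀ (w : List Char), pvChain ps (v ++ w) = v ++ pvChain ps w := by
  intro ps hg
  induction ps generalizing v with
  | nil => intro w; rfl
  | cons p ps' ih =>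
    intro w
    obtain ⟨⟨hne, -, htk, -⟩, -⟩ := hg p List.mem_cons_self
    have hg' : ∀ q ∈ ps', pvGood q := fun q hq => hg q (List.mem_cons_of_mem _ hq)
    have hstep : PySem.Chars.replace (v ++ w) p.1 p.2 = v ++ PySem.Chars.replace w p.1 p.2 := by
      refine pvReplace_append_front p.1 p.2 v w ?_
      intro u2 hs hne2 hpre
      cases u2 with
      | nil => exact hne2 rfl
      | cons a u3 =>
        have ha : a ∈ v := hs.subset List.mem_cons_self
        have hav : a = '%' := by
          cases hp1 : p.1 with
          | nil => exact absurd hp1 hne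
          | cons x xs =>
            rw [hp1] at hpre htk
            obtain ⟨h0, -⟩ := List.cons_prefix_cons.mp hpre
            have hx : x = '%' := by cases xs <;> simp_all
            exact h0 ▸ hx
        exact hv (hav ▸ ha)
    show pvChain ps' (PySem.Chars.replace (v ++ w) p.1 p.2) = v ++ pvChain ps' (PySem.Chars.replace w p.1 p.2)
    rw [hstep]
    exact ih v hv hg' (PySem.Chars.replace w p.1 p.2)

lemma pvChain_front_key (ki : List Char) (hki : pvKeyGood ki) :
    ∀ (ps : List (List Char × List Char)), (∀ p ∈ ps, pvGood p) →
      (∀ p ∈ ps, ¬ p.1 <+: ki ∧ ¬ ki <+: p.1) →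
      ∀ (z : List Char), (∀ w, z ≠ '#' :: w) →
        pvChain ps (ki ++ z) = ki ++ pvChain ps z ∧ (∀ w, pvChain ps z ≠ '#' :: w) := by
  obtain ⟨hne, -, -, hsuf, htails⟩ := hki
  have hlast : ∀ a, [a] <:+ ki → a = '%' := by
    intro a ⟨ta, hta⟩
    obtain ⟨tb, htb⟩ := by simpa using hsuf
    have : ta ++ [a] = (tb ++ ['#']) ++ ['%'] := by rw [hta, ← htb]; simp
    obtain ⟨-, h2⟩ := List.append_inj' this rfl
    simpa using h2
  intro ps
  induction ps with
  | nil => intro _ _ z hz; exact ⟨rfl, hz⟩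
  | cons p ps' ih =>
    intro hg hpf z hz
    obtain ⟨⟨hne2, hnb2, htk2, -⟩, -, hv2⟩ := hg p List.mem_cons_self
    obtain ⟨w2, hw2⟩ : ∃ w2, p.2 = '{' :: w2 := by
      cases hp2 : p.2 with
      | nil => rw [hp2] at hv2; simp at hv2
      | cons b w => rw [hp2] at hv2; simp at hv2; exact ⟨w, by rw [hv2]⟩
    obtain ⟨wk, hwk⟩ : ∃ wk, p.1 = '%' :: '#' :: wk := by
      cases hp1 : p.1 with
      | nil => exact absurd hp1 hne2
      | cons x xs =>
        cases xs with
        | nil => rw [hp1] at htk2; simp at htk2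
        | cons y ys =>
          rw [hp1] at htk2; simp at htk2
          exact ⟨ys, by rw [htk2.1, htk2.2]⟩
    have hg' : ∀ q ∈ ps', pvGood q := fun q hq => hg q (List.mem_cons_of_mem _ hq)
    have hpf' : ∀ q ∈ ps', ¬ q.1 <+: ki ∧ ¬ ki <+: q.1 :=
      fun q hq => hpf q (List.mem_cons_of_mem _ hq)
    -- the replace pass for p leaves the leading ki block intact
    have hstep : PySem.Chars.replace (ki ++ z) p.1 p.2 = ki ++ PySem.Chars.replace z p.1 p.2 := by
      refine pvReplace_append_front p.1 p.2 ki z ?_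
      intro u2 hs hu2 hpre
      cases u2 with
      | nil => exact hu2 rfl
      | cons a u3 =>
        cases u3 with
        | nil =>
          -- one-character overlap: the trailing '%' of ki would start an occurrence of p.1
          have ha : a = '%' := hlast a hs
          rw [hwk, ha] at hpre
          obtain ⟨-, h1⟩ := List.cons_prefix_cons.mp hpre
          obtain ⟨r, hr⟩ := h1
          exact hz (wk ++ r) (by simpa using hr.symm)
        | cons b u4 =>
          -- a longer suffix of ki starting an occurrence must start with "%#", hence be ki itself
          have hab : a = '%' ∧ b = '#' := by
            rw [hwk] at hpre
            obtain ⟨h0, h1⟩ := List.cons_prefix_cons.mp hpre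
            obtain ⟨h2, -⟩ := List.cons_prefix_cons.mp h1
            exact ⟨h0.symm, h2.symm⟩
          have hu2ki : a :: b :: u4 = ki := by
            refine htails _ ((List.mem_tails _ _).mpr hs) ?_ (by simp)
            simp [hab.1, hab.2]
          rw [hu2ki] at hpre
          rcases List.prefix_or_prefix_of_prefix hpre (List.prefix_append ki z) with hc | hc
          · exact (hpf p List.mem_cons_self).1 hc
          · exact (hpf p List.mem_cons_self).2 hc
    have hz' : ∀ w, PySem.Chars.replace z p.1 p.2 ≠ '#' :: w := by
      intro w hw
      have : ['#'] <+: PySem.Chars.replace z p.1 p.2 := by rw [hw]; simp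
      have := pvPrefix_pullback p.1 p.2 hne2 w2 hw2 z ['#'] (by decide) this
      obtain ⟨r, hr⟩ := this
      exact hz r (by rw [← hr]; rfl)
    obtain ⟨ih1, ih2⟩ := ih hg' hpf' (PySem.Chars.replace z p.1 p.2) hz'
    refine ⟨?_, ih2⟩
    show pvChain ps' (PySem.Chars.replace (ki ++ z) p.1 p.2) = ki ++ pvChain ps' (PySem.Chars.replace z p.1 p.2)
    rw [hstep]
    exact ih1

lemma pvMatchKey_none (ps : List (List Char × List Char)) (s : List Char)
    (h : pvMatchKey ps s = none) : ∀ p ∈ ps, ¬ p.1 <+: s := by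
  induction ps with
  | nil => intro p hp; simp at hp
  | cons q rest ih =>
    obtain ⟨k, v⟩ := q
    rw [pvMatchKey] at h
    split_ifs at h with hk
    intro p hp
    rcases List.mem_cons.mp hp with rfl | hp'
    · exact fun hc => hk (by simpa using hc)
    · exact ih h p hp'

lemma pvMatchKey_split (ps : List (List Char × List Char)) (s v : List Char) (klen : Nat)
    (h : pvMatchKey ps s = some (v, klen)) :
    ∃ pre ki post, ps = pre ++ (ki, v) :: post ∧ klen = ki.length ∧ ki <+: s ∧
      ∀ p ∈ pre, ¬ p.1 <+: s := by
  induction ps generalizing v klen with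
  | nil => simp [pvMatchKey] at h
  | cons q rest ih =>
    obtain ⟨k, v'⟩ := q
    rw [pvMatchKey] at h
    split_ifs at h with hk
    · obtain ⟨hv, hl⟩ := by simpa using h
      exact ⟨[], k, rest, by simp [hv], hl.symm, by simpa using hk, by simp⟩
    · obtain ⟨pre, ki, post, h1, h2, h3, h4⟩ := ih v klen h
      refine ⟨(k, v') :: pre, ki, post, by rw [h1]; rfl, h2, h3, ?_⟩
      intro p hp
      rcases List.mem_cons.mp hp with rfl | hp'
      · exact fun hc => hk (by simpa using hc)
      · exact h4 p hp'

lemma pvChain_eq_scan : ∀ (n : Nat) (s : List Char), s.length ≤ n →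
    ¬ (['#', '%', '#'] <:+: s) → pvChain pvMappingC s = pvScanGo n s := by
  intro n
  induction n with
  | zero =>
    intro s hlen _
    have : s = [] := List.eq_nil_of_length_eq_zero (Nat.le_zero.mp hlen)
    subst this
    rw [pvChain_nil pvMappingC pvAllGood]
    rfl
  | succ n ih =>
    intro s hlen hpre
    cases s with
    | nil => rw [pvChain_nil pvMappingC pvAllGood]; rfl
    | cons c t =>
      cases hm : pvMatchKey pvMappingC (c :: t) with
      | none =>
        have hnm := pvMatchKey_none pvMappingC (c :: t) hm
        have hpre' : ¬ (['#', '%', '#'] <:+: t) := fun hc =>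
          hpre (hc.trans (List.IsSuffix.isInfix (List.suffix_cons c t)))
        rw [pvChain_cons pvMappingC pvAllGood c t hnm,
            ih t (by simpa using hlen) hpre']
        simp [pvScanGo, hm]
      | some res =>
        obtain ⟨v, klen⟩ := res
        obtain ⟨pre, ki, post, hsplit, hklen, hkpre, hprenm⟩ :=
          pvMatchKey_split pvMappingC (c :: t) v klen hm
        have hmem : (ki, v) ∈ pvMappingC := by rw [hsplit]; simp
        obtain ⟨hkg, hvnp, -⟩ := pvAllGood (ki, v) hmem
        have hkne : ki ≠ [] := hkg.1
        obtain ⟨y, hy⟩ := id hkpre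
        -- y (the rest after the matched placeholder) cannot start with '#'
        have hz : ∀ w, y ≠ '#' :: w := by
          intro w hw
          obtain ⟨u, hu⟩ := by simpa using hkg.2.2.2.1
          refine hpre ⟨u, w, ?_⟩
          rw [← hy, ← hu, hw]
          simp
        have hgpre : ∀ p ∈ pre, pvGood p := fun p hp =>
          pvAllGood p (by rw [hsplit]; exact List.mem_append_left _ hp)
        have hgpost : ∀ p ∈ post, pvGood p := fun p hp =>
          pvAllGood p (by rw [hsplit]; exact List.mem_append_right _ (List.mem_cons_of_mem _ hp))
        have hpf : ∀ p ∈ pre, ¬ p.1 <+: ki ∧ ¬ ki <+: p.1 := by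
          intro p hp
          have hpm : p ∈ pvMappingC := by rw [hsplit]; exact List.mem_append_left _ hp
          constructor
          · intro hc
            exact hprenm p hp (hc.trans hkpre)
          · intro hc
            have := pvPrefixFree (ki, v) hmem p hpm hc
            have hkip : ki = p.1 := congrArg Prod.fst this
            exact hprenm p hp (hkip ▸ hkpre)
        -- step the chain through pre, the matched pair, and post
        have hchain : pvChain pvMappingC (c :: t) = v ++ pvChain pvMappingC y := by
          have h1 := (pvChain_front_key ki hkg pre hgpre hpf y hz).1
          rw [hsplit, ← hy, pvChain_append, h1]
          show pvChain post (PySem.Chars.replace (ki ++ pvChain pre y) ki v) = _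
          rw [pvReplace_pos ki v _ hkne (List.prefix_append ki _), List.drop_left,
              pvChain_front_val v hvnp post hgpost, pvChain_append]
          rfl
        have hylen : y.length ≤ n := by
          have h1 : (c :: t).length = ki.length + y.length := by rw [← hy]; simp
          have h2 : 0 < ki.length := List.length_pos_iff.mpr hkne
          simp at h1 hlen
          omega
        have hysuf : y <:+ c :: t := ⟨ki, hy⟩
        have hyinf : ¬ (['#', '%', '#'] <:+: y) := fun hc =>
          hpre (hc.trans hysuf.isInfix)
        rw [hchain, ih y hylen hyinf]
        have hdrop : (c :: t).drop klen = y := by rw [← hy, hklen, List.drop_left]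
        simp [pvScanGo, hm, hdrop]

lemma pvStrChain (ps : List (String × String)) : ∀ (t : String),
    ps.foldl (fun x p => PySem.Str.replace x p.1 p.2) t =
      String.ofList (pvChain (ps.map (fun p => (p.1.toList, p.2.toList))) t.toList) := by
  induction ps with
  | nil => intro t; simp [pvChain]
  | cons p ps' ih =>
    intro t
    show List.foldl _ (PySem.Str.replace t p.1 p.2) ps' = _
    rw [ih (PySem.Str.replace t p.1 p.2)]
    simp [PySem.Str.replace, pvChain]

lemma pvA_chars (t : String) :
    normalize_template_syntax t = String.ofList (pvChain pvMappingC t.toList) := by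
  have ht0 : (if t == "" then "" else t) = t := by
    by_cases h : t = "" <;> simp [h]
  show PySem.Str.replace (PySem.Str.replace (PySem.Str.replace
      (pvExtPairs.foldl (fun x p => PySem.Str.replace x p.1 p.2) (if t == "" then "" else t))
      "%#NowTime:YYYY-MM-DD#%" "{{now \"2006-01-02\"}}")
      "%#UploadTime:YYYY-MM-DD#%" "{{publish_time \"2006-01-02\"}}")
      "%#UploadTime:YYYY-MM-DD+HH.mm.ss#%" "{{publish_time \"2006-01-02+15.04.05\"}}"
    = String.ofList (pvChain pvMappingC t.toList)
  rw [ht0, pvStrChain pvExtPairs t]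
  have hsplitMap : pvMappingC =
      pvExtPairs.map (fun p => (p.1.toList, p.2.toList)) ++
        [("%#NowTime:YYYY-MM-DD#%".toList, "{{now \"2006-01-02\"}}".toList),
         ("%#UploadTime:YYYY-MM-DD#%".toList, "{{publish_time \"2006-01-02\"}}".toList),
         ("%#UploadTime:YYYY-MM-DD+HH.mm.ss#%".toList, "{{publish_time \"2006-01-02+15.04.05\"}}".toList)] := by
    decide
  rw [hsplitMap, pvChain_append]
  simp [PySem.Str.replace, pvChain]

-- ===== VERDICT (by name: the statement is the Claim_ definition above) =====
theorem normalize_template_syntax_spec : Claim_equal_normalize_template_syntax := by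
  intro template _ hpre
  unfold Spec_normalize_template_syntax
  have hinf : ¬ (['#', '%', '#'] <:+: template.toList) := by
    unfold Pre_normalize_template_syntax at hpre
    intro hc
    have hlit : "#%#".toList = ['#', '%', '#'] := by decide
    have : PySem.Str.isIn "#%#" template = true := by
      rw [PySem.Str.isIn_eq, PySem.Chars.isIn_iff_infix, hlit]
      exact hc
    rw [hpre] at this
    exact Bool.false_ne_true this
  have hB : normalize_template_syntax_alt template =
      String.ofList (pvScanGo template.toList.length template.toList) := by
    unfold normalize_template_syntax_alt
    by_cases h : template = "" <;> simp [h]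
  rw [pvA_chars, hB, pvChain_eq_scan template.toList.length template.toList le_rfl hinf]
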